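-- pv_equiv track=rewrite | github.com/51193/nlp-project | open_notebook/domain/podcast.py | _analyze_content_tone
-- ===== SOURCE A (Python) =====
-- def _analyze_content_tone(content: str) -> str:
--     """
--     Simple content tone analysis based on keyword detection.
--     In production, this could be enhanced with NLP models.
--     """
--     content_lower = content.lower()
--
--     academic_keywords = ["research", "study", "analysis", "methodology", "hypothesis"]
--     technical_keywords = ["algorithm", "system", "implementation", "framework", "architecture"]
--     storytelling_keywords = ["story", "experience", "journey", "narrative", "personal"]
--
--     academic_score = sum(1 for keyword in academic_keywords if keyword in content_lower)
--     technical_score = sum(1 for keyword in technical_keywords if keyword in content_lower)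
--     storytelling_score = sum(1 for keyword in storytelling_keywords if keyword in content_lower)
--
--     if academic_score >= 2:
--         return "academic"
--     elif technical_score >= 2:
--         return "technical"
--     elif storytelling_score >= 2:
--         return "storytelling"
--     else:
--         return "casual"
-- ===== SOURCE B (Python) =====
-- def _analyze_content_tone(content: str) -> str:
--     """Single scan of the text with a first-letter keyword index collects the set of
--     occurring keywords; categories are then judged by set membership, in priority order."""
--     cl = content.lower()
--     categories = [
--         ("academic", ["research", "study", "analysis", "methodology", "hypothesis"]),
--         ("technical", ["algorithm", "system", "implementation", "framework", "architecture"]),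
--         ("storytelling", ["story", "experience", "journey", "narrative", "personal"]),
--     ]
--     by_first = {}
--     for _, kws in categories:
--         for kw in kws:
--             by_first.setdefault(kw[0], []).append(kw)
--     matched = set()
--     for i, ch in enumerate(cl):
--         for kw in by_first.get(ch, []):
--             if cl.startswith(kw, i):
--                 matched.add(kw)
--     for label, kws in categories:
--         if len([k for k in kws if k in matched]) >= 2:
--             return label
--     return "casual"
-- ===== Notes on version B (the rewrite author's own statement) =====
-- stated objective: alternative
-- what changed: Instead of fifteen independent substring tests (one 'in' per keyword per category), B makes one left-to-right scan of the lowered text using a first-letter keyword index (a simple multi-pattern matcher) to collect the set of keywords that occur, and then classifies by set membership counts per category in the same priority order.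
import Mathlib
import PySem

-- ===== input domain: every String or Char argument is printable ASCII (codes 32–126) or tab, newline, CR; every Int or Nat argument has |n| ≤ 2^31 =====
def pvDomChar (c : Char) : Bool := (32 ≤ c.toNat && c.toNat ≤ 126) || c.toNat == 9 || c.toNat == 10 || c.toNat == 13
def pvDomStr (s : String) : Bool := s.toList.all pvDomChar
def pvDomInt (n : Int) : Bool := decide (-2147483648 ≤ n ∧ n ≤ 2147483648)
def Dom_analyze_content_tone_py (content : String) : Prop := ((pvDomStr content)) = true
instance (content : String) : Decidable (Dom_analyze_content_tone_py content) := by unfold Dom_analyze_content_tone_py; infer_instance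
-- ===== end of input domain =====

-- B replaces A's fifteen independent substring tests by one left-to-right scan of the text with a
-- first-letter keyword index collecting the set of occurring keywords, then classifies by set
-- membership per category in the same priority order (alternative algorithm, similar cost).


-- ===== PORT A =====
def analyze_content_tone_py (content : String) : String :=
  let content_lower := PySem.Str.lower content
  let academic_keywords := ["research", "study", "analysis", "methodology", "hypothesis"]
  let technical_keywords := ["algorithm", "system", "implementation", "framework", "architecture"]
  let storytelling_keywords := ["story", "experience", "journey", "narrative", "personal"]
  let academic_score : Int := academic_keywords.foldl (fun acc keyword => if PySem.Str.isIn keyword content_lower then acc + 1 else acc) 0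
  let technical_score : Int := technical_keywords.foldl (fun acc keyword => if PySem.Str.isIn keyword content_lower then acc + 1 else acc) 0
  let storytelling_score : Int := storytelling_keywords.foldl (fun acc keyword => if PySem.Str.isIn keyword content_lower then acc + 1 else acc) 0
  if academic_score >= 2 then "academic"
  else if technical_score >= 2 then "technical"
  else if storytelling_score >= 2 then "storytelling"
  else "casual"

-- ===== PORT B =====
-- the ordered category table
def pvCategories : List (String × List String) :=
  [("academic", ["research", "study", "analysis", "methodology", "hypothesis"]),
   ("technical", ["algorithm", "system", "implementation", "framework", "architecture"]),
   ("storytelling", ["story", "experience", "journey", "narrative", "personal"])]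

-- by_first.setdefault(kw[0], []).append(kw): Dict.modify; kw[0] = headD since every keyword literal is nonempty
def pvByFirst : PySem.Dict Char (List String) :=
  pvCategories.foldl
    (fun d p => p.2.foldl (fun d kw => PySem.Dict.modify d (kw.toList.headD ' ') [] (fun v => v ++ [kw])) d)
    PySem.Dict.empty

-- for i, ch in enumerate(cl): for kw in by_first.get(ch, []): if cl.startswith(kw, i): matched.add(kw)
-- cl.startswith(kw, i) is exactly Chars.startswith on (l.drop i) since 0 ≤ i ≤ len(cl)
def pvMatched (l : List Char) : PySem.Set String :=
  (PySem.List.enumerate l 0).foldl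
    (fun s p =>
      (pvByFirst.getD p.2 []).foldl
        (fun s kw => if PySem.Chars.startswith (l.drop p.1.toNat) kw.toList then PySem.Set.add s kw else s) s)
    PySem.Set.empty

-- for label, kws in categories: if len([k for k in kws if k in matched]) >= 2: return label
def pvClassify (matched : PySem.Set String) : List (String × List String) → String
  | [] => "casual"
  | (label, kws) :: rest =>
      if (kws.countP (fun k => PySem.Set.contains matched k)) ≥ 2 then label
      else pvClassify matched rest

def analyze_content_tone_py_alt (content : String) : String :=
  pvClassify (pvMatched (PySem.Str.lower content).toList) pvCategories

-- ===== PRECONDITION & SPEC =====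
def Spec_analyze_content_tone_py (content : String) (out : String) : Prop := out = analyze_content_tone_py_alt content
instance (content : String) (out : String) : Decidable (Spec_analyze_content_tone_py content out) := by unfold Spec_analyze_content_tone_py; infer_instance

-- ===== CLAIM (what is proved, stated in full; the proofs are below) =====
def Claim_equal_analyze_content_tone_py : Prop := ∀ (content : String), Dom_analyze_content_tone_py content → Spec_analyze_content_tone_py content (analyze_content_tone_py content)

-- ===== LEMMAS AND PROOFS =====

-- a foldl whose step adds at most one element: membership characterisation
lemma pv_mem_foldl {α β : Type} (step : List α → β → List α) (C : β → α → Prop)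
    (hstep : ∀ s b x, x ∈ step s b ↔ x ∈ s ∨ C b x) :
    ∀ (l : List β) (s : List α) (x : α), x ∈ l.foldl step s ↔ x ∈ s ∨ ∃ b ∈ l, C b x := by
  intro l
  induction l with
  | nil => intro s x; simp
  | cons b l ih =>
      intro s x
      simp only [List.foldl_cons, ih, hstep, List.mem_cons]
      constructor
      · rintro ((h | h) | ⟨b', hb', h⟩)
        · exact Or.inl h
        · exact Or.inr ⟨b, Or.inl rfl, h⟩
        · exact Or.inr ⟨b', Or.inr hb', h⟩
      · rintro (h | ⟨b', (rfl | hb'), h⟩)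
        · exact Or.inl (Or.inl h)
        · exact Or.inl (Or.inr h)
        · exact Or.inr ⟨b', hb', h⟩

-- inner conditional-add loop
lemma pv_mem_addIf (q : String → Bool) (ks : List String) (s : PySem.Set String) (x : String) :
    x ∈ ks.foldl (fun s kw => if q kw then PySem.Set.add s kw else s) s ↔
      x ∈ s ∨ (x ∈ ks ∧ q x = true) := by
  rw [pv_mem_foldl _ (fun kw x => kw = x ∧ q kw = true)
      (by
        intro s b x
        by_cases h : q b
        · simp [h, PySem.Set.mem_add, eq_comm, and_comm, or_comm]
        · simp [h])]
  constructor
  · rintro (h | ⟨b, hb, rfl, hq⟩)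
    · exact Or.inl h
    · exact Or.inr ⟨hb, hq⟩
  · rintro (h | ⟨hx, hq⟩)
    · exact Or.inl h
    · exact Or.inr ⟨x, hx, rfl, hq⟩

lemma pv_mem_matched (l : List Char) (kw : String) :
    kw ∈ pvMatched l ↔
      ∃ p ∈ PySem.List.enumerate l 0,
        kw ∈ pvByFirst.getD p.2 [] ∧ PySem.Chars.startswith (l.drop p.1.toNat) kw.toList = true := by
  unfold pvMatched
  rw [pv_mem_foldl _
      (fun p x => x ∈ pvByFirst.getD p.2 [] ∧ PySem.Chars.startswith (l.drop p.1.toNat) x.toList = true)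
      (by
        intro s p x
        rw [pv_mem_addIf])]
  simp

lemma pv_mem_enumerate {α : Type} : ∀ (l : List α) (s : Int) (j : Nat) (h : j < l.length),
    ((s + j : Int), l[j]) ∈ PySem.List.enumerate l s := by
  intro l
  induction l with
  | nil => intro s j h; simp at h
  | cons a l ih =>
      intro s j h
      cases j with
      | zero => simp [PySem.List.enumerate_cons]
      | succ j =>
          rw [PySem.List.enumerate_cons]
          refine List.mem_cons_of_mem _ ?_
          have := ih (s + 1) j (by simpa using h)
          simpa [add_assoc, add_comm, add_left_comm] using this

-- the key bridge: a keyword (nonempty, indexed under its first letter) is collected by the scan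
-- iff it occurs as a substring
lemma pv_contains_matched (l : List Char) (kw : String) (c0 : Char) (rest : List Char)
    (hk : kw.toList = c0 :: rest) (hbf : kw ∈ pvByFirst.getD c0 []) :
    PySem.Set.contains (pvMatched l) kw = PySem.Chars.isIn kw.toList l := by
  have hiff : kw ∈ pvMatched l ↔ PySem.Chars.isIn kw.toList l = true := by
    rw [pv_mem_matched]
    constructor
    · rintro ⟨p, _, _, hsw⟩
      rw [← PySem.Chars.exists_prefix_drop_iff_isIn]
      exact ⟨p.1.toNat, (PySem.Chars.startswith_iff _ _).mp hsw⟩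
    · intro hin
      obtain ⟨j, hpre⟩ := (PySem.Chars.exists_prefix_drop_iff_isIn (sub := kw.toList) (s := l)).mpr hin
      rw [hk] at hpre
      obtain ⟨t, ht⟩ := hpre
      have hj : j < l.length := by
        by_contra hge
        have : l.drop j = [] := List.drop_eq_nil_of_le (by omega)
        rw [this] at ht; simp at ht
      have hget : l[j] = c0 := by
        have h0 : (l.drop j)[0]? = some c0 := by rw [← ht]; simp
        rw [List.getElem?_drop] at h0
        simpa [List.getElem?_eq_getElem hj] using h0
      refine ⟨((j : Int), l[j]), ?_, ?_, ?_⟩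
      · simpa using pv_mem_enumerate l 0 j hj
      · rw [hget]; exact hbf
      · rw [PySem.Chars.startswith_iff, hk, Int.toNat_natCast]
        exact ⟨t, ht⟩
  rw [Bool.eq_iff_iff, PySem.Set.contains_iff]
  exact hiff

lemma pvFold_eq_countP (cl : String) (kws : List String) :
    kws.foldl (fun acc keyword => if PySem.Str.isIn keyword cl then acc + 1 else acc) (0 : Int)
      = (kws.countP (fun k => PySem.Str.isIn k cl) : Int) := by
  have h : ∀ (l : List String) (a : Int),
      l.foldl (fun acc keyword => if PySem.Str.isIn keyword cl then acc + 1 else acc) a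
        = a + (l.countP (fun k => PySem.Str.isIn k cl) : Int) := by
    intro l
    induction l with
    | nil => intro a; simp
    | cons x xs ih =>
        intro a
        simp only [List.foldl_cons, List.countP_cons, ih]
        split_ifs <;> push_cast <;> ring
  simpa using h kws 0

-- ===== VERDICT (by name: the statement is the Claim_ definition above) =====
set_option maxHeartbeats 1000000 in
theorem analyze_content_tone_py_spec : Claim_equal_analyze_content_tone_py := by
  intro content _
  unfold Spec_analyze_content_tone_py analyze_content_tone_py analyze_content_tone_py_alt
  set cl := PySem.Str.lower content with hcl
  have hbridge : ∀ kw c0 rest, kw.toList = c0 :: rest → kw ∈ pvByFirst.getD c0 [] →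
      PySem.Set.contains (pvMatched cl.toList) kw = PySem.Str.isIn kw cl := by
    intro kw c0 rest hk hbf
    rw [pv_contains_matched cl.toList kw c0 rest hk hbf]
    simp [PySem.Str.isIn]
  have h1 := hbridge "research" 'r' "esearch".toList rfl (by decide)
  have h2 := hbridge "study" 's' "tudy".toList rfl (by decide)
  have h3 := hbridge "analysis" 'a' "nalysis".toList rfl (by decide)
  have h4 := hbridge "methodology" 'm' "ethodology".toList rfl (by decide)
  have h5 := hbridge "hypothesis" 'h' "ypothesis".toList rfl (by decide)
  have h6 := hbridge "algorithm" 'a' "lgorithm".toList rfl (by decide)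
  have h7 := hbridge "system" 's' "ystem".toList rfl (by decide)
  have h8 := hbridge "implementation" 'i' "mplementation".toList rfl (by decide)
  have h9 := hbridge "framework" 'f' "ramework".toList rfl (by decide)
  have h10 := hbridge "architecture" 'a' "rchitecture".toList rfl (by decide)
  have h11 := hbridge "story" 's' "tory".toList rfl (by decide)
  have h12 := hbridge "experience" 'e' "xperience".toList rfl (by decide)
  have h13 := hbridge "journey" 'j' "ourney".toList rfl (by decide)
  have h14 := hbridge "narrative" 'n' "arrative".toList rfl (by decide)
  have h15 := hbridge "personal" 'p' "ersonal".toList rfl (by decide)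
  simp only [pvCategories, pvClassify, pvFold_eq_countP, List.countP_cons, List.countP_nil,
    h1, h2, h3, h4, h5, h6, h7, h8, h9, h10, h11, h12, h13, h14, h15, ge_iff_le, Nat.ofNat_le_cast]
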